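-- pv_equiv track=rewrite | github.com/Mrzhao2018/ascii_dungeon_pygame | game/loot.py | pick_drop
-- ===== SOURCE A (Python) =====
-- from typing import Dict, List, Tuple
--
-- LOOT_TABLE: Dict[str, List[Tuple[str, int, int, int]]] = {
--     'basic': [
--         ('gold', 1, 3, 70),
--         ('nothing', 0, 0, 30),
--     ],
--     'guard': [
--         ('gold', 2, 5, 60),
--         ('stamina_shard', 1, 1, 10),
--         ('nothing', 0, 0, 30),
--     ],
--     'scout': [
--         ('gold', 1, 2, 50),
--         ('speed_fragment', 1, 1, 10),
--         ('nothing', 0, 0, 40),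
--     ],
--     'brute': [
--         ('gold', 3, 7, 65),
--         ('hp_fragment', 1, 1, 15),
--         ('nothing', 0, 0, 20),
--     ],
-- }
--
-- def deterministic_rng(seed_val: int) -> int:
--     """Simple LCG-like hash to derive pseudo-random but deterministic values."""
--     x = (seed_val ^ 0x9E3779B1) & 0xFFFFFFFF
--     x = (x * 1664525 + 1013904223) & 0xFFFFFFFF
--     return x
--
-- def pick_drop(kind: str, seed_val: int):
--     """Pick a single drop entry for given kind using deterministic hashed seed.
--     Returns (item_key, quantity) or (None, 0) if no drop."""
--     table = LOOT_TABLE.get(kind, LOOT_TABLE.get('basic', []))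
--     if not table:
--         return None, 0
--     total_weight = sum(w for _, _, _, w in table)
--     if total_weight <= 0:
--         return None, 0
--     r = deterministic_rng(seed_val) % total_weight
--     for item_key, mn, mx, w in table:
--         if r < w:
--             if item_key == 'nothing':
--                 return None, 0
--             # derive deterministic quantity
--             span = max(0, mx - mn)
--             if span == 0:
--                 qty = mn
--             else:
--                 qty = mn + (deterministic_rng(seed_val ^ 0xABCDEF) % (span + 1))
--             return item_key, qty
--         r -= w
--     return None, 0
-- ===== SOURCE B (Python) =====
-- from typing import Dict, List, Tuple
--
-- LOOT_TABLE: Dict[str, List[Tuple[str, int, int, int]]] = {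
--     'basic': [
--         ('gold', 1, 3, 70),
--         ('nothing', 0, 0, 30),
--     ],
--     'guard': [
--         ('gold', 2, 5, 60),
--         ('stamina_shard', 1, 1, 10),
--         ('nothing', 0, 0, 30),
--     ],
--     'scout': [
--         ('gold', 1, 2, 50),
--         ('speed_fragment', 1, 1, 10),
--         ('nothing', 0, 0, 40),
--     ],
--     'brute': [
--         ('gold', 3, 7, 65),
--         ('hp_fragment', 1, 1, 15),
--         ('nothing', 0, 0, 20),
--     ],
-- }
--
-- def deterministic_rng(seed_val: int) -> int:
--     """Simple LCG-like hash to derive pseudo-random but deterministic values."""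
--     x = (seed_val ^ 0x9E3779B1) & 0xFFFFFFFF
--     x = (x * 1664525 + 1013904223) & 0xFFFFFFFF
--     return x
--
-- def pick_drop(kind: str, seed_val: int):
--     """Pick a single drop entry: prefix sums + binary search instead of a
--     subtract-and-scan loop."""
--     table = LOOT_TABLE.get(kind, LOOT_TABLE.get('basic', []))
--     if not table:
--         return None, 0
--     cumulative = []
--     total = 0
--     for _, _, _, w in table:
--         total += w
--         cumulative.append(total)
--     if total <= 0:
--         return None, 0
--     r = deterministic_rng(seed_val) % total
--     # first index with cumulative[i] > r (equivalent to bisect_right)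
--     lo, hi = 0, len(cumulative)
--     while lo < hi:
--         mid = (lo + hi) // 2
--         if cumulative[mid] <= r:
--             lo = mid + 1
--         else:
--             hi = mid
--     item_key, mn, mx, _w = table[lo]
--     if item_key == 'nothing':
--         return None, 0
--     span = max(0, mx - mn)
--     if span == 0:
--         qty = mn
--     else:
--         qty = mn + (deterministic_rng(seed_val ^ 0xABCDEF) % (span + 1))
--     return item_key, qty
-- ===== Notes on version B (the rewrite author's own statement) =====
-- stated objective: alternative
-- what changed: Replaced the subtract-and-scan loop over weights with a prefix-sum (cumulative) list built in one pass plus a binary search (bisect_right-style) for the first cumulative weight exceeding r.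
import Mathlib
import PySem

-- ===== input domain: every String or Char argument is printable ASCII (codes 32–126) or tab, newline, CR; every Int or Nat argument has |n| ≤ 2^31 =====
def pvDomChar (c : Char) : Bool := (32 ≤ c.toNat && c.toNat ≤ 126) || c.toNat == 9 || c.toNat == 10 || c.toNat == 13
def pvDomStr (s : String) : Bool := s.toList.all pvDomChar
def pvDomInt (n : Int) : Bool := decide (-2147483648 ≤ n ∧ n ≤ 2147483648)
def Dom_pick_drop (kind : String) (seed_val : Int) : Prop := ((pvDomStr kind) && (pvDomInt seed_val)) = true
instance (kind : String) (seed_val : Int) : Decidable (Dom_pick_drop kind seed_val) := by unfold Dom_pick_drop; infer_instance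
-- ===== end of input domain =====

-- B replaces A's subtract-and-scan weight loop by a one-pass prefix-sum list plus a
-- binary search for the first cumulative weight exceeding r (objective: alternative).

-- ===== PORT A =====
abbrev Entry := String × Int × Int × Int

def LOOT_TABLE : PySem.Dict String (List Entry) := PySem.Dict.mk [
  ("basic", [("gold", 1, 3, 70), ("nothing", 0, 0, 30)]),
  ("guard", [("gold", 2, 5, 60), ("stamina_shard", 1, 1, 10), ("nothing", 0, 0, 30)]),
  ("scout", [("gold", 1, 2, 50), ("speed_fragment", 1, 1, 10), ("nothing", 0, 0, 40)]),
  ("brute", [("gold", 3, 7, 65), ("hp_fragment", 1, 1, 15), ("nothing", 0, 0, 20)])]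

def deterministic_rng (seed_val : Int) : Int :=
  let x := PySem.Int.band (PySem.Int.bxor seed_val 0x9E3779B1) 0xFFFFFFFF
  PySem.Int.band (x * 1664525 + 1013904223) 0xFFFFFFFF

-- A's for-loop with early return and mutable r, as structural recursion over the table
def pickScanA (seed_val : Int) : List Entry → Int → Option String × Int
  | [], _ => (none, 0)
  | (item_key, mn, mx, w) :: rest, r =>
    if r < w then
      if item_key == "nothing" then (none, 0)
      else
        let span := max 0 (mx - mn)
        if span == 0 then (some item_key, mn)
        else (some item_key, mn + PySem.Int.mod (deterministic_rng (PySem.Int.bxor seed_val 0xABCDEF)) (span + 1))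
    else pickScanA seed_val rest (r - w)

def pick_drop (kind : String) (seed_val : Int) : Option String × Int :=
  let table := LOOT_TABLE.getD kind (LOOT_TABLE.getD "basic" [])
  if table.isEmpty then (none, 0)
  else
    let total_weight := (table.map (fun e => e.2.2.2)).sum
    if total_weight ≤ 0 then (none, 0)
    else pickScanA seed_val table (PySem.Int.mod (deterministic_rng seed_val) total_weight)

-- ===== PORT B =====
-- Source B's while-loop binary search: first index in [lo,hi) with cum[i] > r
def bsearchFirstGt (cum : List Int) (r : Int) (lo hi : Nat) : Nat :=
  if h : lo < hi then
    let mid := (lo + hi) / 2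
    if cum.getD mid 0 ≤ r then bsearchFirstGt cum r (mid + 1) hi
    else bsearchFirstGt cum r lo mid
  else lo
termination_by hi - lo
decreasing_by all_goals omega

def pick_drop_alt (kind : String) (seed_val : Int) : Option String × Int :=
  let table := LOOT_TABLE.getD kind (LOOT_TABLE.getD "basic" [])
  if table.isEmpty then (none, 0)
  else
    -- one pass building the prefix-sum list and the running total
    let acc := table.foldl (fun (p : List Int × Int) e => (p.1 ++ [p.2 + e.2.2.2], p.2 + e.2.2.2)) ([], 0)
    let cumulative := acc.1
    let total := acc.2
    if total ≤ 0 then (none, 0)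
    else
      let r := PySem.Int.mod (deterministic_rng seed_val) total
      let i := bsearchFirstGt cumulative r 0 cumulative.length
      let e := table.getD i ("", 0, 0, 0)  -- getD default only for totality; i < length here
      if e.1 == "nothing" then (none, 0)
      else
        let span := max 0 (e.2.2.1 - e.2.1)
        if span == 0 then (some e.1, e.2.1)
        else (some e.1, e.2.1 + PySem.Int.mod (deterministic_rng (PySem.Int.bxor seed_val 0xABCDEF)) (span + 1))

-- ===== PRECONDITION & SPEC =====
def Spec_pick_drop (kind : String) (seed_val : Int) (out : Option String × Int) : Prop := out = pick_drop_alt kind seed_val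
instance (kind : String) (seed_val : Int) (out : Option String × Int) : Decidable (Spec_pick_drop kind seed_val out) := by unfold Spec_pick_drop; infer_instance

-- ===== CLAIM (what is proved, stated in full; the proofs are below) =====
def Claim_equal_pick_drop : Prop := ∀ (kind : String) (seed_val : Int), Dom_pick_drop kind seed_val → Spec_pick_drop kind seed_val (pick_drop kind seed_val)

-- ===== LEMMAS AND PROOFS =====

lemma pick_eq_basic (kind : String) (seed_val : Int)
    (hk : LOOT_TABLE.getD kind (LOOT_TABLE.getD "basic" []) = [("gold", 1, 3, 70), ("nothing", 0, 0, 30)]) :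
    pick_drop kind seed_val = pick_drop_alt kind seed_val := by
  simp only [pick_drop, pick_drop_alt, hk]
  norm_num [List.foldl, List.isEmpty]
  have h0 := PySem.Int.mod_nonneg (deterministic_rng seed_val) (b := 100) (by norm_num)
  have h1 := PySem.Int.mod_lt (deterministic_rng seed_val) (b := 100) (by norm_num)
  set r := PySem.Int.mod (deterministic_rng seed_val) 100 with hr
  simp [pickScanA, bsearchFirstGt, List.getD]
  split_ifs <;> first | rfl | omega | simp_all

lemma pick_eq_guard (seed_val : Int) :
    pick_drop "guard" seed_val = pick_drop_alt "guard" seed_val := by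
  simp only [pick_drop, pick_drop_alt, show LOOT_TABLE.getD "guard" (LOOT_TABLE.getD "basic" []) = [("gold", 2, 5, 60), ("stamina_shard", 1, 1, 10), ("nothing", 0, 0, 30)] from rfl]
  norm_num [List.foldl, List.isEmpty]
  have h0 := PySem.Int.mod_nonneg (deterministic_rng seed_val) (b := 100) (by norm_num)
  have h1 := PySem.Int.mod_lt (deterministic_rng seed_val) (b := 100) (by norm_num)
  set r := PySem.Int.mod (deterministic_rng seed_val) 100 with hr
  simp [pickScanA, bsearchFirstGt, List.getD]
  split_ifs <;> first | rfl | omega | simp_all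

lemma pick_eq_scout (seed_val : Int) :
    pick_drop "scout" seed_val = pick_drop_alt "scout" seed_val := by
  simp only [pick_drop, pick_drop_alt, show LOOT_TABLE.getD "scout" (LOOT_TABLE.getD "basic" []) = [("gold", 1, 2, 50), ("speed_fragment", 1, 1, 10), ("nothing", 0, 0, 40)] from rfl]
  norm_num [List.foldl, List.isEmpty]
  have h0 := PySem.Int.mod_nonneg (deterministic_rng seed_val) (b := 100) (by norm_num)
  have h1 := PySem.Int.mod_lt (deterministic_rng seed_val) (b := 100) (by norm_num)
  set r := PySem.Int.mod (deterministic_rng seed_val) 100 with hr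
  simp [pickScanA, bsearchFirstGt, List.getD]
  split_ifs <;> first | rfl | omega | simp_all

lemma pick_eq_brute (seed_val : Int) :
    pick_drop "brute" seed_val = pick_drop_alt "brute" seed_val := by
  simp only [pick_drop, pick_drop_alt, show LOOT_TABLE.getD "brute" (LOOT_TABLE.getD "basic" []) = [("gold", 3, 7, 65), ("hp_fragment", 1, 1, 15), ("nothing", 0, 0, 20)] from rfl]
  norm_num [List.foldl, List.isEmpty]
  have h0 := PySem.Int.mod_nonneg (deterministic_rng seed_val) (b := 100) (by norm_num)
  have h1 := PySem.Int.mod_lt (deterministic_rng seed_val) (b := 100) (by norm_num)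
  set r := PySem.Int.mod (deterministic_rng seed_val) 100 with hr
  simp [pickScanA, bsearchFirstGt, List.getD]
  split_ifs <;> first | rfl | omega | simp_all

-- ===== VERDICT (by name: the statement is the Claim_ definition above) =====
theorem pick_drop_spec : Claim_equal_pick_drop := by
  intro kind seed_val _
  unfold Spec_pick_drop
  by_cases hb : kind = "basic"
  · subst hb; exact pick_eq_basic _ _ rfl
  by_cases hg : kind = "guard"
  · subst hg; exact pick_eq_guard seed_val
  by_cases hs : kind = "scout"
  · subst hs; exact pick_eq_scout seed_val
  by_cases hr : kind = "brute"
  · subst hr; exact pick_eq_brute seed_val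
  · exact pick_eq_basic kind seed_val (by
      simp [LOOT_TABLE, PySem.Dict.getD_eq_get?_getD, PySem.Dict.get?,
        Ne.symm hb, Ne.symm hg, Ne.symm hs, Ne.symm hr])
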